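-- pv_equiv track=rewrite | github.com/natelgrw/titan_foundation_model | netlists/clean_gana.py | get_parameters
-- ===== SOURCE A (Python) =====
-- def get_parameters(file_list):
--     """
--     Extracts circuit parameters for sizing from a .scs netlist file.
--
--     Args:
--         file_list (list): List of lines from a .scs netlist file.
--
--     Returns:
--         list: Sorted list of unique circuit parameters.
--     """
--     params = {"tempc={{tempc}}", "nA={{nA}}", "vcm={{vcm}}", "vdd={{vdd}}"}
--     r_counter, c_counter = -1, -1
--
--     for line in file_list:
--         tokens = line.split()
--         if not tokens:
--             continue
--
--         # transistor components
--         first_token = tokens[0]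
--         if first_token.startswith("MM"):
--             for token in tokens[1:]:
--                 if token.startswith("nfin="):
--                     param_name = f"nB{token[7:]}={{{{nB{token[7:]}}}}}"
--                     params.add(param_name)
--
--         # resistor components
--         elif first_token.startswith("R"):
--             r_counter += 1
--             params.add(f"nR{r_counter}={{{{nR{r_counter}}}}}")
--
--         # capacitor components
--         elif first_token.startswith("C"):
--             c_counter += 1
--             params.add(f"nC{c_counter}={{{{nC{c_counter}}}}}")
--
--         # voltage bias sources
--         elif first_token.startswith("VN") or first_token.startswith("VP"):
--             token_list = line.split()
--             elt = token_list[4].replace("dc=", "")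
--             params.add(f"{elt}={{{{{elt}}}}}")
--
--     return sorted(params)
-- ===== SOURCE B (Python) =====
-- def get_parameters(file_list):
--     """Count-then-generate re-implementation: pre-split lines once, count R/C
--     components to generate nR/nC params via range, then one pass for MM/V bias params."""
--     params = {"tempc={{tempc}}", "nA={{nA}}", "vcm={{vcm}}", "vdd={{vdd}}"}
--
--     token_lines = [t for t in (line.split() for line in file_list) if t]
--     k = sum(1 for t in token_lines if t[0].startswith("R"))
--     m = sum(1 for t in token_lines if t[0].startswith("C"))
--     params.update(f"nR{i}={{{{nR{i}}}}}" for i in range(k))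
--     params.update(f"nC{i}={{{{nC{i}}}}}" for i in range(m))
--
--     for t in token_lines:
--         first = t[0]
--         if first.startswith("MM"):
--             for tok in t[1:]:
--                 if tok.startswith("nfin="):
--                     v = tok[7:]
--                     params.add(f"nB{v}={{{{nB{v}}}}}")
--         elif first.startswith("VN") or first.startswith("VP"):
--             elt = t[4].replace("dc=", "")
--             params.add(f"{elt}={{{{{elt}}}}}")
--
--     return sorted(params)
-- ===== Notes on version B (the rewrite author's own statement) =====
-- stated objective: alternative
-- what changed: Replaces A's stateful incremental r/c counters with a count-then-generate pass: lines are split and filtered once, the R and C components are counted, nR0..nR(k-1)/nC0..nC(m-1) are generated from range(k)/range(m) via set.update, and a separate pass collects only the MM/bias-source parameters.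
import Mathlib
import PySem

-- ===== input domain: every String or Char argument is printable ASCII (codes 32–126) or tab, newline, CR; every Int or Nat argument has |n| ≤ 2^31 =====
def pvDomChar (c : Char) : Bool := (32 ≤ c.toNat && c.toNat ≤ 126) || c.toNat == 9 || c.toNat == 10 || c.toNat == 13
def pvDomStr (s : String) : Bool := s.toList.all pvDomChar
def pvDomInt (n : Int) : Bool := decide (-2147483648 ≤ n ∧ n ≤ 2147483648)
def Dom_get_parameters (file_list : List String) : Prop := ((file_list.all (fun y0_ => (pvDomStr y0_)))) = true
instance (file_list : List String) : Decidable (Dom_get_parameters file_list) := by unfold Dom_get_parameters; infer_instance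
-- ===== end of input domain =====

-- B replaces A's stateful incremental r/c counters by a count-then-generate decomposition
-- (split once, count R/C lines, generate nR/nC names from ranges, separate pass for MM/bias params).

-- ===== PORT A =====
-- A-side helper: the body of A's for-loop; state = (params, r_counter, c_counter)
def aStep (st : PySem.Set String × Int × Int) (line : String) : PySem.Set String × Int × Int :=
  match PySem.Str.split₀ line with
  | [] => st
  | first :: rest =>
    if PySem.Str.startswith first "MM" then
      (rest.foldl (fun s tok =>
          if PySem.Str.startswith tok "nfin=" then
            let v := PySem.Str.slice tok (some 7) none
            PySem.Set.add s ("nB" ++ v ++ "={{nB" ++ v ++ "}}")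
          else s) st.1, st.2.1, st.2.2)
    else if PySem.Str.startswith first "R" then
      (PySem.Set.add st.1
        ("nR" ++ PySem.Int.toStr (st.2.1 + 1) ++ "={{nR" ++ PySem.Int.toStr (st.2.1 + 1) ++ "}}"),
        st.2.1 + 1, st.2.2)
    else if PySem.Str.startswith first "C" then
      (PySem.Set.add st.1
        ("nC" ++ PySem.Int.toStr (st.2.2 + 1) ++ "={{nC" ++ PySem.Int.toStr (st.2.2 + 1) ++ "}}"),
        st.2.1, st.2.2 + 1)
    else if (PySem.Str.startswith first "VN" || PySem.Str.startswith first "VP") then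
      -- token_list[4]: IndexError on fewer than 5 tokens — those inputs are excluded by Pre_;
      -- inside Pre_ the pyGetD default is never used, so this is exact
      let elt := PySem.Str.replace (PySem.List.pyGetD (first :: rest) 4 "") "dc=" ""
      (PySem.Set.add st.1 (elt ++ "={{" ++ elt ++ "}}"), st.2.1, st.2.2)
    else st

def get_parameters (file_list : List String) : List String :=
  PySem.List.sorted
    (file_list.foldl aStep
      (PySem.Set.ofList ["tempc={{tempc}}", "nA={{nA}}", "vcm={{vcm}}", "vdd={{vdd}}"], -1, -1)).1
    (fun x => x) false

-- ===== PORT B =====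
-- B-side helper: the body of B's second pass (set-only state; no counters)
def bStep (s : PySem.Set String) (t : List String) : PySem.Set String :=
  match t with
  | [] => s   -- unreachable: token_lines keeps only nonempty token lists
  | first :: rest =>
    if PySem.Str.startswith first "MM" then
      rest.foldl (fun s tok =>
          if PySem.Str.startswith tok "nfin=" then
            let v := PySem.Str.slice tok (some 7) none
            PySem.Set.add s ("nB" ++ v ++ "={{nB" ++ v ++ "}}")
          else s) s
    else if (PySem.Str.startswith first "VN" || PySem.Str.startswith first "VP") then
      -- t[4]: IndexError on short bias lines — excluded by Pre_, exact inside Pre_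
      let elt := PySem.Str.replace (PySem.List.pyGetD (first :: rest) 4 "") "dc=" ""
      PySem.Set.add s (elt ++ "={{" ++ elt ++ "}}")
    else s

def get_parameters_alt (file_list : List String) : List String :=
  let token_lines := (file_list.map PySem.Str.split₀).filter (fun t => !t.isEmpty)
  -- sum(1 for t in token_lines if t[0].startswith(...)) ported as countP (t[0] = headD: tokens nonempty)
  let k : Int := (token_lines.countP (fun t => PySem.Str.startswith (t.headD "") "R") : Nat)
  let m : Int := (token_lines.countP (fun t => PySem.Str.startswith (t.headD "") "C") : Nat)
  let params0 := PySem.Set.ofList ["tempc={{tempc}}", "nA={{nA}}", "vcm={{vcm}}", "vdd={{vdd}}"]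
  let params1 := PySem.Set.update params0 ((PySem.List.pyRange 0 k).map (fun i =>
      "nR" ++ PySem.Int.toStr i ++ "={{nR" ++ PySem.Int.toStr i ++ "}}"))
  let params2 := PySem.Set.update params1 ((PySem.List.pyRange 0 m).map (fun i =>
      "nC" ++ PySem.Int.toStr i ++ "={{nC" ++ PySem.Int.toStr i ++ "}}"))
  PySem.List.sorted (token_lines.foldl bStep params2) (fun x => x) false

-- ===== PRECONDITION & SPEC =====
-- Pre_ excludes exactly the inputs where A raises IndexError: a line whose first token starts
-- with "VN" or "VP" but which has fewer than 5 whitespace-separated tokens (B raises there too).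
def Pre_get_parameters (file_list : List String) : Prop :=
  ∀ line ∈ file_list,
    (PySem.Str.startswith ((PySem.Str.split₀ line).headD "") "VN"
      || PySem.Str.startswith ((PySem.Str.split₀ line).headD "") "VP") = true →
    5 ≤ (PySem.Str.split₀ line).length
instance (file_list : List String) : Decidable (Pre_get_parameters file_list) := by
  unfold Pre_get_parameters; infer_instance
def pvWitness_get_parameters : List String :=
  ["MM0 d g s b nfin=12", "R1 a b", "C7 x", "", "VN2 net1 net2 vsource dc=700.0m"]
def Spec_get_parameters (file_list : List String) (out : List String) : Prop := out = get_parameters_alt file_list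
instance (file_list : List String) (out : List String) : Decidable (Spec_get_parameters file_list out) := by unfold Spec_get_parameters; infer_instance

-- ===== CLAIM (what is proved, stated in full; the proofs are below) =====
def Claim_equal_get_parameters : Prop := ∀ (file_list : List String), Dom_get_parameters file_list → Pre_get_parameters file_list → Spec_get_parameters file_list (get_parameters file_list)

-- ===== LEMMAS AND PROOFS =====

-- names added by the branches, as pure functions
def nRn (i : Int) : String := "nR" ++ PySem.Int.toStr i ++ "={{nR" ++ PySem.Int.toStr i ++ "}}"
def nCn (i : Int) : String := "nC" ++ PySem.Int.toStr i ++ "={{nC" ++ PySem.Int.toStr i ++ "}}"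
def vnAdd (t : List String) : String :=
  let elt := PySem.Str.replace (PySem.List.pyGetD t 4 "") "dc=" ""
  elt ++ "={{" ++ elt ++ "}}"
def mmAdds (rest : List String) : List String :=
  (rest.filter (fun tok => PySem.Str.startswith tok "nfin=")).map
    (fun tok => "nB" ++ PySem.Str.slice tok (some 7) none
        ++ "={{nB" ++ PySem.Str.slice tok (some 7) none ++ "}}")

def tlsOf (fl : List String) : List (List String) :=
  (fl.map PySem.Str.split₀).filter (fun t => !t.isEmpty)

-- elements A's loop adds, threading the two counters
def addedA : List String → Int → Int → List String
  | [], _, _ => []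
  | line :: ls, r, c =>
    match PySem.Str.split₀ line with
    | [] => addedA ls r c
    | first :: rest =>
      if PySem.Str.startswith first "MM" then mmAdds rest ++ addedA ls r c
      else if PySem.Str.startswith first "R" then nRn (r+1) :: addedA ls (r+1) c
      else if PySem.Str.startswith first "C" then nCn (c+1) :: addedA ls r (c+1)
      else if (PySem.Str.startswith first "VN" || PySem.Str.startswith first "VP") then
        vnAdd (first :: rest) :: addedA ls r c
      else addedA ls r c

-- elements B's second pass adds
def addedB : List (List String) → List String
  | [] => []
  | t :: ts =>
    match t with
    | [] => addedB ts
    | first :: rest =>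
      if PySem.Str.startswith first "MM" then mmAdds rest ++ addedB ts
      else if (PySem.Str.startswith first "VN" || PySem.Str.startswith first "VP") then
        vnAdd (first :: rest) :: addedB ts
      else addedB ts

lemma sw_firstChar {f p : String} {c : Char} {t : List Char} (hp : p.toList = c :: t)
    (h : PySem.Str.startswith f p = true) : f.toList.head? = some c := by
  rw [PySem.Str.startswith_eq, PySem.Chars.startswith_iff] at h
  obtain ⟨r, hr⟩ := h
  rw [← hr, hp]; rfl

lemma sw_disj {f : String} {p q : String} {c d : Char} {tp tq : List Char}
    (hp : p.toList = c :: tp) (hq : q.toList = d :: tq) (hne : c ≠ d)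
    (h : PySem.Str.startswith f p = true) : ¬ PySem.Str.startswith f q = true := by
  intro hq'
  have h1 := sw_firstChar hp h
  have h2 := sw_firstChar hq hq'
  rw [h1] at h2
  exact hne (Option.some.injEq _ _ ▸ h2)

-- the shared inner MM loop
lemma mmFold (rest : List String) : ∀ (s : PySem.Set String),
    (∀ x, x ∈ rest.foldl (fun s tok =>
        if PySem.Str.startswith tok "nfin=" then
          let v := PySem.Str.slice tok (some 7) none
          PySem.Set.add s ("nB" ++ v ++ "={{nB" ++ v ++ "}}")
        else s) s ↔ x ∈ s ∨ x ∈ mmAdds rest) ∧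
    (s.Nodup → (rest.foldl (fun s tok =>
        if PySem.Str.startswith tok "nfin=" then
          let v := PySem.Str.slice tok (some 7) none
          PySem.Set.add s ("nB" ++ v ++ "={{nB" ++ v ++ "}}")
        else s) s).Nodup) := by
  induction rest with
  | nil => intro s; simp [mmAdds]
  | cons tok rest ih =>
    intro s
    by_cases h : PySem.Str.startswith tok "nfin=" = true
    · refine ⟨fun x => ?_, fun hs => ?_⟩
      · simp only [List.foldl_cons, (ih _).1, PySem.Set.mem_add, mmAdds,
          List.filter_cons, h, if_true, List.map_cons, List.mem_cons]
        tauto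
      · simp only [List.foldl_cons, if_pos h]
        exact (ih _).2 (PySem.Set.nodup_add _ _ hs)
    · refine ⟨fun x => ?_, fun hs => ?_⟩
      · simp only [List.foldl_cons, (ih _).1, mmAdds,
          List.filter_cons, h, if_false, Bool.false_eq_true]
      · simp only [List.foldl_cons, if_neg h]
        exact (ih _).2 hs

lemma A_fold (lines : List String) : ∀ (s : PySem.Set String) (r c : Int),
    (∀ x, x ∈ (lines.foldl aStep (s, r, c)).1 ↔ x ∈ s ∨ x ∈ addedA lines r c) ∧
    (s.Nodup → (lines.foldl aStep (s, r, c)).1.Nodup) := by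
  induction lines with
  | nil => intro s r c; simp [addedA]
  | cons line ls ih =>
    intro s r c
    rcases h : PySem.Str.split₀ line with _ | ⟨first, rest⟩
    · simp only [List.foldl_cons, aStep, h, addedA]
      exact ih s r c
    · simp only [List.foldl_cons, aStep, h, addedA]
      split_ifs with h1 h2 h3 h4
      · refine ⟨fun x => ?_, fun hs => ?_⟩
        · rw [(ih _ _ _).1, (mmFold rest s).1, List.mem_append]; tauto
        · exact (ih _ _ _).2 ((mmFold rest s).2 hs)
      · refine ⟨fun x => ?_, fun hs => ?_⟩
        · rw [(ih _ _ _).1, PySem.Set.mem_add, List.mem_cons]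
          simp only [nRn]
          tauto
        · exact (ih _ _ _).2 (PySem.Set.nodup_add _ _ hs)
      · refine ⟨fun x => ?_, fun hs => ?_⟩
        · rw [(ih _ _ _).1, PySem.Set.mem_add, List.mem_cons]
          simp only [nCn]
          tauto
        · exact (ih _ _ _).2 (PySem.Set.nodup_add _ _ hs)
      · refine ⟨fun x => ?_, fun hs => ?_⟩
        · rw [(ih _ _ _).1, PySem.Set.mem_add, List.mem_cons]
          simp only [vnAdd]
          tauto
        · exact (ih _ _ _).2 (PySem.Set.nodup_add _ _ hs)
      · exact ih s r c

lemma B_fold (ts : List (List String)) : ∀ (s : PySem.Set String),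
    (∀ x, x ∈ ts.foldl bStep s ↔ x ∈ s ∨ x ∈ addedB ts) ∧
    (s.Nodup → (ts.foldl bStep s).Nodup) := by
  induction ts with
  | nil => intro s; simp [addedB]
  | cons t ts ih =>
    intro s
    rcases t with _ | ⟨first, rest⟩
    · simp only [List.foldl_cons, bStep, addedB]
      exact ih s
    · simp only [List.foldl_cons, bStep, addedB]
      split_ifs with h1 h2
      · refine ⟨fun x => ?_, fun hs => ?_⟩
        · rw [(ih _).1, (mmFold rest s).1, List.mem_append]; tauto
        · exact (ih _).2 ((mmFold rest s).2 hs)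
      · refine ⟨fun x => ?_, fun hs => ?_⟩
        · rw [(ih _).1, PySem.Set.mem_add, List.mem_cons]
          simp only [vnAdd]
          tauto
        · exact (ih _).2 (PySem.Set.nodup_add _ _ hs)
      · exact ih s

lemma addedA_mem (lines : List String) : ∀ (r c : Int) (x : String),
    x ∈ addedA lines r c ↔
      (∃ i : Int, r < i ∧
        i ≤ r + ((tlsOf lines).countP (fun t => PySem.Str.startswith (t.headD "") "R") : Nat) ∧
        x = nRn i) ∨
      (∃ i : Int, c < i ∧
        i ≤ c + ((tlsOf lines).countP (fun t => PySem.Str.startswith (t.headD "") "C") : Nat) ∧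
        x = nCn i) ∨
      x ∈ addedB (tlsOf lines) := by
  induction lines with
  | nil =>
    intro r c x
    simp only [addedA, tlsOf, List.map_nil, List.filter_nil, List.countP_nil, addedB,
      Nat.cast_zero, add_zero, List.not_mem_nil, false_iff]
    rintro (⟨i, h1, h2, _⟩ | ⟨i, h1, h2, _⟩ | h)
    · omega
    · omega
    · exact h
  | cons line ls ih =>
    intro r c x
    rcases h : PySem.Str.split₀ line with _ | ⟨first, rest⟩
    · have htls : tlsOf (line :: ls) = tlsOf ls := by simp [tlsOf, h]
      rw [htls]
      simp only [addedA, h]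
      exact ih r c x
    · have htls : tlsOf (line :: ls) = (first :: rest) :: tlsOf ls := by simp [tlsOf, h]
      rw [htls]
      simp only [addedA, h]
      split_ifs with h1 h2 h3 h4
      -- MM branch: first starts with "MM", hence not with "R"/"C"/"VN"/"VP"
      · have hR : PySem.Str.startswith first "R" = false := by
          simpa using sw_disj (p := "MM") (q := "R") (c := 'M') (d := 'R') (tp := ['M']) (tq := []) (by decide) (by decide) (by decide) h1
        have hC : PySem.Str.startswith first "C" = false := by
          simpa using sw_disj (p := "MM") (q := "C") (c := 'M') (d := 'C') (tp := ['M']) (tq := []) (by decide) (by decide) (by decide) h1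
        have hKR : List.countP (fun t => PySem.Str.startswith (t.headD "") "R")
            ((first :: rest) :: tlsOf ls) = List.countP (fun t => PySem.Str.startswith (t.headD "") "R") (tlsOf ls) := by
          simp only [List.countP_cons, List.headD_cons, hR]; simp
        have hKC : List.countP (fun t => PySem.Str.startswith (t.headD "") "C")
            ((first :: rest) :: tlsOf ls) = List.countP (fun t => PySem.Str.startswith (t.headD "") "C") (tlsOf ls) := by
          simp only [List.countP_cons, List.headD_cons, hC]; simp
        have haB : addedB ((first :: rest) :: tlsOf ls) = mmAdds rest ++ addedB (tlsOf ls) := by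
          simp only [addedB]; rw [if_pos h1]
        rw [hKR, hKC, haB]
        simp only [List.mem_append, ih r c x]
        constructor
        · rintro (hx | hx | hx | hx)
          exacts [Or.inr (Or.inr (Or.inl hx)), Or.inl hx, Or.inr (Or.inl hx),
            Or.inr (Or.inr (Or.inr hx))]
        · rintro (hx | hx | hx | hx)
          exacts [Or.inr (Or.inl hx), Or.inr (Or.inr (Or.inl hx)), Or.inl hx,
            Or.inr (Or.inr (Or.inr hx))]
      -- R branch
      · have hMM : PySem.Str.startswith first "MM" = false := by simpa using h1
        have hC : PySem.Str.startswith first "C" = false := by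
          simpa using sw_disj (p := "R") (q := "C") (c := 'R') (d := 'C') (tp := []) (tq := []) (by decide) (by decide) (by decide) h2
        have hVN : PySem.Str.startswith first "VN" = false := by
          simpa using sw_disj (p := "R") (q := "VN") (c := 'R') (d := 'V') (tp := []) (tq := ['N']) (by decide) (by decide) (by decide) h2
        have hVP : PySem.Str.startswith first "VP" = false := by
          simpa using sw_disj (p := "R") (q := "VP") (c := 'R') (d := 'V') (tp := []) (tq := ['P']) (by decide) (by decide) (by decide) h2
        have hKR : List.countP (fun t => PySem.Str.startswith (t.headD "") "R")
            ((first :: rest) :: tlsOf ls) = List.countP (fun t => PySem.Str.startswith (t.headD "") "R") (tlsOf ls) + 1 := by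
          simp only [List.countP_cons, List.headD_cons, h2]; simp
        have hKC : List.countP (fun t => PySem.Str.startswith (t.headD "") "C")
            ((first :: rest) :: tlsOf ls) = List.countP (fun t => PySem.Str.startswith (t.headD "") "C") (tlsOf ls) := by
          simp only [List.countP_cons, List.headD_cons, hC]; simp
        have haB : addedB ((first :: rest) :: tlsOf ls) = addedB (tlsOf ls) := by
          simp only [addedB]; rw [if_neg (by rw [hMM]; simp), if_neg (by rw [hVN, hVP]; simp)]
        rw [hKR, hKC, haB]
        simp only [List.mem_cons, ih (r+1) c x]
        constructor
        · rintro (rfl | ⟨i, hi1, hi2, rfl⟩ | hx | hx)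
          · exact Or.inl ⟨r+1, by omega, by push_cast; omega, rfl⟩
          · exact Or.inl ⟨i, by omega, by push_cast at hi2 ⊢; omega, rfl⟩
          · exact Or.inr (Or.inl hx)
          · exact Or.inr (Or.inr hx)
        · rintro (⟨i, hi1, hi2, rfl⟩ | hx | hx)
          · rcases eq_or_lt_of_le (show r+1 ≤ i by omega) with hh | hh
            · exact Or.inl (by rw [← hh])
            · exact Or.inr (Or.inl ⟨i, hh, by push_cast at hi2 ⊢; omega, rfl⟩)
          · exact Or.inr (Or.inr (Or.inl hx))
          · exact Or.inr (Or.inr (Or.inr hx))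
      -- C branch
      · have hMM : PySem.Str.startswith first "MM" = false := by simpa using h1
        have hR : PySem.Str.startswith first "R" = false := by simpa using h2
        have hVN : PySem.Str.startswith first "VN" = false := by
          simpa using sw_disj (p := "C") (q := "VN") (c := 'C') (d := 'V') (tp := []) (tq := ['N']) (by decide) (by decide) (by decide) h3
        have hVP : PySem.Str.startswith first "VP" = false := by
          simpa using sw_disj (p := "C") (q := "VP") (c := 'C') (d := 'V') (tp := []) (tq := ['P']) (by decide) (by decide) (by decide) h3
        have hKR : List.countP (fun t => PySem.Str.startswith (t.headD "") "R")
            ((first :: rest) :: tlsOf ls) = List.countP (fun t => PySem.Str.startswith (t.headD "") "R") (tlsOf ls) := by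
          simp only [List.countP_cons, List.headD_cons, hR]; simp
        have hKC : List.countP (fun t => PySem.Str.startswith (t.headD "") "C")
            ((first :: rest) :: tlsOf ls) = List.countP (fun t => PySem.Str.startswith (t.headD "") "C") (tlsOf ls) + 1 := by
          simp only [List.countP_cons, List.headD_cons, h3]; simp
        have haB : addedB ((first :: rest) :: tlsOf ls) = addedB (tlsOf ls) := by
          simp only [addedB]; rw [if_neg (by rw [hMM]; simp), if_neg (by rw [hVN, hVP]; simp)]
        rw [hKR, hKC, haB]
        simp only [List.mem_cons, ih r (c+1) x]
        constructor
        · rintro (rfl | hx | ⟨i, hi1, hi2, rfl⟩ | hx)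
          · exact Or.inr (Or.inl ⟨c+1, by omega, by push_cast; omega, rfl⟩)
          · exact Or.inl hx
          · exact Or.inr (Or.inl ⟨i, by omega, by push_cast at hi2 ⊢; omega, rfl⟩)
          · exact Or.inr (Or.inr hx)
        · rintro (hx | ⟨i, hi1, hi2, rfl⟩ | hx)
          · exact Or.inr (Or.inl hx)
          · rcases eq_or_lt_of_le (show c+1 ≤ i by omega) with hh | hh
            · exact Or.inl (by rw [← hh])
            · exact Or.inr (Or.inr (Or.inl ⟨i, hh, by push_cast at hi2 ⊢; omega, rfl⟩))
          · exact Or.inr (Or.inr (Or.inr hx))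
      -- VN/VP branch
      · have hMM : PySem.Str.startswith first "MM" = false := by simpa using h1
        have hR : PySem.Str.startswith first "R" = false := by simpa using h2
        have hC : PySem.Str.startswith first "C" = false := by simpa using h3
        have hKR : List.countP (fun t => PySem.Str.startswith (t.headD "") "R")
            ((first :: rest) :: tlsOf ls) = List.countP (fun t => PySem.Str.startswith (t.headD "") "R") (tlsOf ls) := by
          simp only [List.countP_cons, List.headD_cons, hR]; simp
        have hKC : List.countP (fun t => PySem.Str.startswith (t.headD "") "C")
            ((first :: rest) :: tlsOf ls) = List.countP (fun t => PySem.Str.startswith (t.headD "") "C") (tlsOf ls) := by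
          simp only [List.countP_cons, List.headD_cons, hC]; simp
        have haB : addedB ((first :: rest) :: tlsOf ls) = vnAdd (first :: rest) :: addedB (tlsOf ls) := by
          simp only [addedB]; rw [if_neg (by rw [hMM]; simp), if_pos h4]
        rw [hKR, hKC, haB]
        simp only [List.mem_cons, ih r c x]
        constructor
        · rintro (hx | hx | hx | hx)
          exacts [Or.inr (Or.inr (Or.inl hx)), Or.inl hx, Or.inr (Or.inl hx),
            Or.inr (Or.inr (Or.inr hx))]
        · rintro (hx | hx | hx | hx)
          exacts [Or.inr (Or.inl hx), Or.inr (Or.inr (Or.inl hx)), Or.inl hx,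
            Or.inr (Or.inr (Or.inr hx))]
      -- other components
      · have hMM : PySem.Str.startswith first "MM" = false := by simpa using h1
        have hR : PySem.Str.startswith first "R" = false := by simpa using h2
        have hC : PySem.Str.startswith first "C" = false := by simpa using h3
        have hV : (PySem.Str.startswith first "VN" || PySem.Str.startswith first "VP") = false := by
          simpa using h4
        have hKR : List.countP (fun t => PySem.Str.startswith (t.headD "") "R")
            ((first :: rest) :: tlsOf ls) = List.countP (fun t => PySem.Str.startswith (t.headD "") "R") (tlsOf ls) := by
          simp only [List.countP_cons, List.headD_cons, hR]; simp
        have hKC : List.countP (fun t => PySem.Str.startswith (t.headD "") "C")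
            ((first :: rest) :: tlsOf ls) = List.countP (fun t => PySem.Str.startswith (t.headD "") "C") (tlsOf ls) := by
          simp only [List.countP_cons, List.headD_cons, hC]; simp
        have haB : addedB ((first :: rest) :: tlsOf ls) = addedB (tlsOf ls) := by
          simp only [addedB]; rw [if_neg (by rw [hMM]; simp), if_neg (by rw [hV]; simp)]
        rw [hKR, hKC, haB]
        exact ih r c x

-- ===== VERDICT (by name: the statement is the Claim_ definition above) =====
theorem get_parameters_spec : Claim_equal_get_parameters := by
  intro fl _ _
  show get_parameters fl = get_parameters_alt fl
  simp only [get_parameters, get_parameters_alt]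
  rw [show List.filter (fun t => !t.isEmpty) (List.map PySem.Str.split₀ fl) = tlsOf fl from rfl]
  apply PySem.List.sorted_eq_sorted_of_perm _ _ _ (fun _ _ h => h)
  have hA := A_fold fl
    (PySem.Set.ofList ["tempc={{tempc}}", "nA={{nA}}", "vcm={{vcm}}", "vdd={{vdd}}"]) (-1) (-1)
  refine (List.perm_ext_iff_of_nodup (hA.2 (PySem.Set.nodup_ofList _))
    ((B_fold (tlsOf fl) _).2 (PySem.Set.nodup_update _ _
      (PySem.Set.nodup_update _ _ (PySem.Set.nodup_ofList _))))).2 ?_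
  intro x
  rw [hA.1 x, (B_fold (tlsOf fl) _).1 x, PySem.Set.mem_update, PySem.Set.mem_update,
    addedA_mem fl (-1) (-1) x]
  simp only [List.mem_map, PySem.List.mem_pyRange_one, nRn, nCn]
  constructor
  · rintro (hx | ⟨i, h1, h2, rfl⟩ | ⟨i, h1, h2, rfl⟩ | hx)
    · exact Or.inl (Or.inl (Or.inl hx))
    · exact Or.inl (Or.inl (Or.inr ⟨i, ⟨by omega, by omega⟩, rfl⟩))
    · exact Or.inl (Or.inr ⟨i, ⟨by omega, by omega⟩, rfl⟩)
    · exact Or.inr hx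
  · rintro (((hx | ⟨i, ⟨h1, h2⟩, rfl⟩) | ⟨i, ⟨h1, h2⟩, rfl⟩) | hx)
    · exact Or.inl hx
    · exact Or.inr (Or.inl ⟨i, by omega, by omega, rfl⟩)
    · exact Or.inr (Or.inr (Or.inl ⟨i, by omega, by omega, rfl⟩))
    · exact Or.inr (Or.inr (Or.inr hx))
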